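-- pv_equiv track=rewrite | github.com/joelvzach/applsoftcomp-sprint-m03 | .agents/skills/target-shopper/tools/route_optimizer.py | group_items_by_aisle
-- ===== SOURCE A (Python) =====
-- from typing import List, Dict, Tuple, Optional
--
-- def group_items_by_aisle(
--     items: List[Dict],
--     route_order: List[str]
-- ) -> List[Dict]:
--     """
--     Order items according to the optimized route.
--     Items in same aisle are grouped together.
--     """
--     aisle_order = {aisle: i for i, aisle in enumerate(route_order) if aisle not in ['entrance', 'checkout']}
--
--     def item_sort_key(item):
--         aisle = item.get('aisle', 'ZZ999')
--         order = aisle_order.get(aisle, 999)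
--         return (order, aisle, item.get('name', ''))
--
--     return sorted(items, key=item_sort_key)
-- ===== SOURCE B (Python) =====
-- def group_items_by_aisle(items, route_order):
--     """Group items into per-aisle buckets, then emit buckets in route order,
--     each bucket sorted by name (stable)."""
--     aisle_order = {aisle: i for i, aisle in enumerate(route_order) if aisle not in ['entrance', 'checkout']}
--     buckets = {}
--     for item in items:
--         aisle = item.get('aisle', 'ZZ999')
--         buckets[aisle] = buckets.get(aisle, []) + [item]
--     result = []
--     for aisle in sorted(buckets.keys(), key=lambda a: (aisle_order.get(a, 999), a)):
--         result.extend(sorted(buckets[aisle], key=lambda it: it.get('name', '')))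
--     return result
-- ===== Notes on version B (the rewrite author's own statement) =====
-- stated objective: alternative
-- what changed: Replaces the single stable sort with a composite (order, aisle, name) key by a group-by-aisle pass into buckets, sorting the bucket keys by (order, aisle) and each bucket by name only.
import Mathlib
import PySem

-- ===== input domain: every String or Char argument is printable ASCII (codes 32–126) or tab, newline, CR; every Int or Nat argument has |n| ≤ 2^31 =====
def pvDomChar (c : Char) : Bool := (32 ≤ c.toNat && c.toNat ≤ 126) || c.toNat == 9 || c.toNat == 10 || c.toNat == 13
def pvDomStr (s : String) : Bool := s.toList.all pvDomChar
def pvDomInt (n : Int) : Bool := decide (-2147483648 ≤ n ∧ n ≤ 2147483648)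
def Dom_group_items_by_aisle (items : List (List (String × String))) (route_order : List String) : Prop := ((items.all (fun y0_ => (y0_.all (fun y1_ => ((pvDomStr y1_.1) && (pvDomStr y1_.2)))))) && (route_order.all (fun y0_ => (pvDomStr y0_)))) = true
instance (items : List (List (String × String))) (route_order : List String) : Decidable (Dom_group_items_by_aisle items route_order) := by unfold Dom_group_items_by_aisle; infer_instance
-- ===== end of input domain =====

-- ===== PORT A =====
-- B groups items into per-aisle buckets and sorts each bucket by name instead of
-- one stable sort under the composite (order, aisle, name) key (objective: alternative).
-- item.get('aisle', 'ZZ999') / item.get('name', '')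
def pvAisleOf (item : List (String × String)) : String :=
  PySem.Dict.getD (PySem.Dict.mk item) "aisle" "ZZ999"
def pvNameOf (item : List (String × String)) : String :=
  PySem.Dict.getD (PySem.Dict.mk item) "name" ""

-- dict comprehension {aisle: i for i, aisle in enumerate(route_order) if aisle not in ['entrance','checkout']}
def pvAisleOrder (route_order : List String) : PySem.Dict String Int :=
  (PySem.List.enumerate route_order).foldl
    (fun d p => if p.2 ∈ (["entrance", "checkout"] : List String) then d
                else PySem.Dict.insert d p.2 p.1) PySem.Dict.empty

-- A's nested helper item_sort_key: the tuple (order, aisle, name), lexicographic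
def item_sort_key (aisle_order : PySem.Dict String Int) (item : List (String × String)) :
    Lex (Lex (Int × String) × String) :=
  let aisle := pvAisleOf item
  let order := PySem.Dict.getD aisle_order aisle 999
  -- the tuple (order, aisle, name); Lex = Python's lexicographic tuple comparison
  show Lex (Lex (Int × String) × String) from ((order, aisle), pvNameOf item)

def group_items_by_aisle (items : List (List (String × String))) (route_order : List String) : List (List (String × String)) :=
  let aisle_order := pvAisleOrder route_order
  PySem.List.sorted items (item_sort_key aisle_order) false

-- ===== PORT B =====
def group_items_by_aisle_alt (items : List (List (String × String))) (route_order : List String) : List (List (String × String)) :=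
  let aisle_order := pvAisleOrder route_order
  let buckets : PySem.Dict String (List (List (String × String))) :=
    items.foldl (fun d item =>
      PySem.Dict.insert d (pvAisleOf item) (PySem.Dict.getD d (pvAisleOf item) [] ++ [item]))
      PySem.Dict.empty
  (PySem.List.sorted (PySem.Dict.keys buckets)
      (fun a => toLex (PySem.Dict.getD aisle_order a 999, a)) false).flatMap
    (fun a => PySem.List.sorted (PySem.Dict.getD buckets a []) pvNameOf false)

-- ===== PRECONDITION & SPEC =====
def Spec_group_items_by_aisle (items : List (List (String × String))) (route_order : List String) (out : List (List (String × String))) : Prop := out = group_items_by_aisle_alt items route_order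
instance (items : List (List (String × String))) (route_order : List String) (out : List (List (String × String))) : Decidable (Spec_group_items_by_aisle items route_order out) := by unfold Spec_group_items_by_aisle; infer_instance

-- ===== CLAIM (what is proved, stated in full; the proofs are below) =====
def Claim_equal_group_items_by_aisle : Prop := ∀ (items : List (List (String × String))) (route_order : List String), Dom_group_items_by_aisle items route_order → Spec_group_items_by_aisle items route_order (group_items_by_aisle items route_order)

-- ===== LEMMAS AND PROOFS =====

lemma insertBy_nil {α : Type} (before : α → α → Bool) (x : α) :
    PySem.List.insertBy before x [] = [x] := rfl

lemma insertBy_cons {α : Type} (before : α → α → Bool) (x y : α) (ys : List α) :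
    PySem.List.insertBy before x (y :: ys) =
      if before x y then x :: y :: ys else y :: PySem.List.insertBy before x ys := rfl

lemma filter_insertBy_neg {α : Type} (p : α → Bool) (before : α → α → Bool) (x : α) (ys : List α)
    (hx : p x = false) : (PySem.List.insertBy before x ys).filter p = ys.filter p := by
  induction ys with
  | nil => simp [insertBy_nil, hx]
  | cons y ys ih =>
    rw [insertBy_cons]
    by_cases hb : before x y
    · rw [if_pos hb, List.filter_cons_of_neg (by simp [hx])]
    · rw [if_neg hb, List.filter_cons, List.filter_cons, ih]

lemma filter_insertBy_pos {α κ : Type} [LinearOrder κ] (k : α → κ) (v : κ) (x : α) (ys : List α)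
    (hx : k x = v) (hs : ys.Pairwise (fun a b => k a ≤ k b)) :
    (PySem.List.insertBy (fun a b => decide (k a < k b)) x ys).filter (fun y => decide (k y = v))
      = ys.filter (fun y => decide (k y = v)) ++ [x] := by
  induction ys with
  | nil => simp [insertBy_nil, hx]
  | cons y ys ih =>
    rcases List.pairwise_cons.mp hs with ⟨hy, hs'⟩
    rw [insertBy_cons]
    by_cases hlt : k x < k y
    · rw [if_pos (by simpa using hlt)]
      have hnil : (y :: ys).filter (fun z => decide (k z = v)) = [] := by
        apply List.filter_eq_nil_iff.mpr
        intro z hz hzv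
        have hyz : k y ≤ k z := by
          rcases List.mem_cons.mp hz with rfl | hz'
          · exact le_rfl
          · exact hy z hz'
        have hzv' : k z = v := of_decide_eq_true hzv
        rw [← hx] at hzv'
        exact absurd (hzv' ▸ hyz) (not_le.mpr hlt)
      rw [List.filter_cons_of_pos (by simp [hx]), hnil]
      simp
    · rw [if_neg (by simpa using hlt), List.filter_cons, List.filter_cons, ih hs']
      split <;> rfl

lemma filter_sorted {α κ : Type} [LinearOrder κ] (k : α → κ) (xs : List α) (v : κ) :
    (PySem.List.sorted xs k).filter (fun y => decide (k y = v)) = xs.filter (fun y => decide (k y = v)) := by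
  induction xs using List.reverseRecOn with
  | nil => simp [PySem.List.sorted]
  | append_singleton xs x ih =>
    rw [PySem.List.sorted_eq_foldl_insertBy] at ih ⊢
    rw [List.foldl_append, List.foldl_cons, List.foldl_nil]
    have hp : (List.foldl (fun acc x => PySem.List.insertBy (fun a b => decide (k a < k b)) x acc) [] xs).Pairwise
        (fun a b => k a ≤ k b) := by
      have := PySem.List.sorted_pairwise xs k
      rwa [PySem.List.sorted_eq_foldl_insertBy] at this
    by_cases h : k x = v
    · rw [filter_insertBy_pos k v x _ h hp, ih, List.filter_append]
      simp [h]
    · rw [filter_insertBy_neg _ _ _ _ (by simp [h]), ih, List.filter_append]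
      simp [h]

lemma eq_of_pairwise_of_filter_eq {α κ : Type} [LinearOrder κ] (k : α → κ) :
    ∀ (as bs : List α), as.Pairwise (fun a b => k a ≤ k b) → bs.Pairwise (fun a b => k a ≤ k b) →
    (∀ v, as.filter (fun y => decide (k y = v)) = bs.filter (fun y => decide (k y = v))) → as = bs := by
  intro as
  induction as with
  | nil =>
    intro bs _ _ hf
    cases bs with
    | nil => rfl
    | cons b bs => have := hf (k b); simp at this
  | cons a as ih =>
    intro bs hA hB hf
    cases bs with
    | nil => have := hf (k a); simp at this
    | cons b bs =>
      rcases List.pairwise_cons.mp hA with ⟨hA1, hA2⟩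
      rcases List.pairwise_cons.mp hB with ⟨hB1, hB2⟩
      have hab : k a = k b := by
        rcases lt_trichotomy (k a) (k b) with h | h | h
        · exfalso
          have hbs : bs.filter (fun y => decide (k y = k a)) = [] :=
            List.filter_eq_nil_iff.mpr (fun z hz hzv => by
              have hzv' : k z = k a := of_decide_eq_true hzv
              exact absurd (hzv' ▸ (hB1 z hz)) (not_le.mpr h))
          have h2 := hf (k a)
          rw [List.filter_cons_of_pos (by simp), List.filter_cons_of_neg (by simp [h.ne']), hbs] at h2
          exact List.cons_ne_nil _ _ h2
        · exact h
        · exfalso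
          have has : as.filter (fun y => decide (k y = k b)) = [] :=
            List.filter_eq_nil_iff.mpr (fun z hz hzv => by
              have hzv' : k z = k b := of_decide_eq_true hzv
              exact absurd (hzv' ▸ (hA1 z hz)) (not_le.mpr h))
          have h2 := hf (k b)
          rw [List.filter_cons_of_neg (by simp [h.ne']), List.filter_cons_of_pos (by simp), has] at h2
          exact List.cons_ne_nil _ _ h2.symm
      have hfa := hf (k a)
      rw [List.filter_cons_of_pos (by simp), List.filter_cons_of_pos (by simp [hab])] at hfa
      rcases List.cons_eq_cons.mp hfa with ⟨hEq, htl⟩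
      have htail : ∀ v, as.filter (fun y => decide (k y = v)) = bs.filter (fun y => decide (k y = v)) := by
        intro v
        by_cases hv : v = k a
        · subst hv; exact htl
        · have h2 := hf v
          rw [List.filter_cons_of_neg (by simpa using fun h => hv h.symm),
            List.filter_cons_of_neg (by rw [← hab]; simpa using fun h => hv h.symm)] at h2
          exact h2
      rw [hEq, ih bs hA2 hB2 htail]

lemma flatMap_eq_of_nodup {α β : Type} [DecidableEq α] :
    ∀ (l : List α) (g : α → List β) (s : α), l.Nodup → s ∈ l →
      (∀ a ∈ l, a ≠ s → g a = []) → l.flatMap g = g s := by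
  intro l
  induction l with
  | nil => intro g s _ h; simp at h
  | cons a l ih =>
    intro g s hnd hmem hothers
    rcases List.nodup_cons.mp hnd with ⟨hnotin, hnd'⟩
    rcases List.mem_cons.mp hmem with rfl | hmem'
    · have : l.flatMap g = [] := List.flatMap_eq_nil_iff.mpr (fun x hx =>
        hothers x (List.mem_cons_of_mem _ hx) (fun h => hnotin (h ▸ hx)))
      simp [List.flatMap_cons, this]
    · have ha : g a = [] := hothers a List.mem_cons_self (fun h => hnotin (h ▸ hmem'))
      rw [List.flatMap_cons, ha, List.nil_append,
        ih g s hnd' hmem' (fun x hx hxs => hothers x (List.mem_cons_of_mem _ hx) hxs)]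

lemma getD_bucket_fold (a : String) :
    ∀ (items : List (List (String × String))) (d : PySem.Dict String (List (List (String × String)))),
    PySem.Dict.getD (items.foldl (fun d item =>
        PySem.Dict.insert d (pvAisleOf item) (PySem.Dict.getD d (pvAisleOf item) [] ++ [item])) d) a []
      = PySem.Dict.getD d a [] ++ items.filter (fun it => decide (pvAisleOf it = a)) := by
  intro items
  induction items with
  | nil => intro d; simp
  | cons it items ih =>
    intro d
    rw [List.foldl_cons, ih, PySem.Dict.getD_insert, List.filter_cons]
    by_cases h : pvAisleOf it = a
    · rw [if_pos h.symm]
      simp [h]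
    · rw [if_neg (fun hh => h hh.symm)]
      simp [h]

-- the characterization of B's output used throughout the proof
lemma alt_characterization (items : List (List (String × String))) (route_order : List String) :
    group_items_by_aisle_alt items route_order =
      (PySem.List.sorted (PySem.Set.ofList (items.map pvAisleOf))
          (fun a => toLex (PySem.Dict.getD (pvAisleOrder route_order) a 999, a)) false).flatMap
        (fun a => PySem.List.sorted (items.filter (fun it => decide (pvAisleOf it = a))) pvNameOf false) := by
  unfold group_items_by_aisle_alt
  have hkeys : (items.foldl (fun d item =>
      PySem.Dict.insert d (pvAisleOf item) (PySem.Dict.getD d (pvAisleOf item) [] ++ [item]))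
      (PySem.Dict.empty : PySem.Dict String (List (List (String × String))))).keys
      = PySem.Set.ofList (items.map pvAisleOf) := by
    rw [PySem.Dict.keys_foldl_insert_key items pvAisleOf
      (fun d x => PySem.Dict.getD d (pvAisleOf x) [] ++ [x]) PySem.Dict.empty, PySem.Dict.keys_empty]
    rfl
  simp only [hkeys, getD_bucket_fold, PySem.Dict.getD_empty, List.nil_append]

theorem group_items_by_aisle_eq (items : List (List (String × String))) (route_order : List String) :
    group_items_by_aisle items route_order = group_items_by_aisle_alt items route_order := by
  classical
  set AO := pvAisleOrder route_order with hAO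
  set K := item_sort_key AO with hK
  set kA : String → Lex (Int × String) := fun a => toLex (PySem.Dict.getD AO a 999, a) with hkA
  set SK := PySem.List.sorted (PySem.Set.ofList (items.map pvAisleOf)) kA false with hSK
  set chunk : String → List (List (String × String)) := fun a =>
    PySem.List.sorted (items.filter (fun it => decide (pvAisleOf it = a))) pvNameOf false with hchunk
  have hKdef : ∀ it, K it = toLex (toLex (PySem.Dict.getD AO (pvAisleOf it) 999, pvAisleOf it), pvNameOf it) :=
    fun it => rfl
  have hBeq : group_items_by_aisle_alt items route_order = SK.flatMap chunk :=
    alt_characterization items route_order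
  -- membership facts
  have hmemSK : ∀ a, a ∈ SK ↔ a ∈ items.map pvAisleOf := by
    intro a
    rw [hSK, PySem.List.mem_sorted, PySem.Set.mem_ofList]
  have hndSK : SK.Nodup :=
    ((PySem.List.sorted_perm _ kA false).nodup_iff).mpr (PySem.Set.nodup_ofList _)
  have hchunkmem : ∀ a x, x ∈ chunk a → pvAisleOf x = a ∧ x ∈ items := by
    intro a x hx
    rw [hchunk, PySem.List.mem_sorted, List.mem_filter] at hx
    exact ⟨of_decide_eq_true hx.2, hx.1⟩
  -- strict pairwise on SK
  have hkAinj : Function.Injective kA := by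
    intro a b hab
    rw [hkA] at hab
    have := toLex_inj.mp hab
    exact (Prod.mk.injEq _ _ _ _ ▸ this).2
  have hSKlt : SK.Pairwise (fun a b => kA a < kA b) := by
    have hle : SK.Pairwise (fun a b => kA a ≤ kA b) := PySem.List.sorted_pairwise _ kA
    have hne : SK.Pairwise (fun a b => a ≠ b) := hndSK
    exact (hle.and hne).imp (fun h => lt_of_le_of_ne h.1 (fun he => h.2 (hkAinj he)))
  -- B is pairwise-sorted under K
  have hBpair : (SK.flatMap chunk).Pairwise (fun x y => K x ≤ K y) := by
    rw [List.pairwise_flatMap]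
    constructor
    · intro a _
      have hp : (chunk a).Pairwise (fun x y => pvNameOf x ≤ pvNameOf y) :=
        PySem.List.sorted_pairwise (items.filter (fun it => decide (pvAisleOf it = a))) pvNameOf
      refine hp.imp_of_mem (fun {x y} hx hy hxy => ?_)
      have hax := (hchunkmem a x hx).1
      have hay := (hchunkmem a y hy).1
      rw [hKdef, hKdef, hax, hay]
      exact Prod.Lex.le_iff.mpr (Or.inr ⟨rfl, hxy⟩)
    · refine hSKlt.imp_of_mem (fun {a b} ha hb hab => ?_)
      intro x hx y hy
      have hax := (hchunkmem a x hx).1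
      have hby := (hchunkmem b y hy).1
      rw [hKdef, hKdef, hax, hby]
      exact le_of_lt (Prod.Lex.lt_iff.mpr (Or.inl hab))
  -- B has the same per-key filters as items
  have hBfilter : ∀ v, (SK.flatMap chunk).filter (fun y => decide (K y = v))
      = items.filter (fun y => decide (K y = v)) := by
    intro v
    set o : Int := (ofLex (ofLex v).1).1 with ho
    set s : String := (ofLex (ofLex v).1).2 with hs
    set n : String := (ofLex v).2 with hn
    have hv : v = toLex (toLex (o, s), n) := rfl
    have hKiff : ∀ it, K it = v ↔ (pvAisleOf it = s ∧ PySem.Dict.getD AO s 999 = o ∧ pvNameOf it = n) := by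
      intro it
      rw [hKdef, hv]
      constructor
      · intro h
        have h1 := toLex_inj.mp h
        have h2 := (Prod.mk.injEq _ _ _ _ ▸ h1)
        have h3 := toLex_inj.mp h2.1
        have h4 := (Prod.mk.injEq _ _ _ _ ▸ h3)
        exact ⟨h4.2, h4.2 ▸ h4.1, h2.2⟩
      · rintro ⟨h1, h2, h3⟩
        rw [h1, h2, h3]
    rw [List.filter_flatMap]
    by_cases hcase : s ∈ SK ∧ PySem.Dict.getD AO s 999 = o
    · -- exactly the bucket of s survives
      obtain ⟨hsSK, hso⟩ := hcase
      have hothers : ∀ a ∈ SK, a ≠ s → (chunk a).filter (fun y => decide (K y = v)) = [] := by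
        intro a _ hne
        exact List.filter_eq_nil_iff.mpr (fun x hx hxv => by
          have h1 := (hKiff x).mp (of_decide_eq_true hxv)
          exact hne ((hchunkmem a x hx).1 ▸ h1.1 ▸ rfl))
      rw [flatMap_eq_of_nodup SK _ s hndSK hsSK hothers]
      have hcongr1 : (chunk s).filter (fun y => decide (K y = v))
          = (chunk s).filter (fun y => decide (pvNameOf y = n)) :=
        List.filter_congr (fun x hx => by
          have hax := (hchunkmem s x hx).1
          simp only [decide_eq_decide]
          rw [hKiff x]
          constructor
          · exact fun h => h.2.2
          · exact fun h => ⟨hax, hso, h⟩)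
      rw [hcongr1, hchunk]
      rw [filter_sorted pvNameOf]
      rw [List.filter_filter]
      exact (List.filter_congr (fun x _ => by
        rw [← Bool.decide_and, decide_eq_decide, hKiff x]
        constructor
        · exact fun h => ⟨h.2.2, h.1⟩
        · exact fun h => ⟨h.2, hso, h.1⟩)).symm
    · -- nothing matches v
      have hleft : SK.flatMap (fun a => (chunk a).filter (fun y => decide (K y = v))) = [] := by
        apply List.flatMap_eq_nil_iff.mpr
        intro a haSK
        apply List.filter_eq_nil_iff.mpr
        intro x hx hxv
        have h1 := (hKiff x).mp (of_decide_eq_true hxv)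
        have hax := (hchunkmem a x hx).1
        exact hcase ⟨(hax ▸ h1.1 : a = s) ▸ haSK, h1.2.1⟩
      rw [hleft]
      exact (List.filter_eq_nil_iff.mpr (fun x hx hxv => by
        have h1 := (hKiff x).mp (of_decide_eq_true hxv)
        have hsin : s ∈ SK := (hmemSK s).mpr (h1.1 ▸ List.mem_map_of_mem hx)
        exact hcase ⟨hsin, h1.2.1⟩)).symm
  -- conclude
  rw [hBeq]
  show PySem.List.sorted items K false = SK.flatMap chunk
  exact eq_of_pairwise_of_filter_eq K (PySem.List.sorted items K) (SK.flatMap chunk)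
    (PySem.List.sorted_pairwise items K) hBpair
    (fun v => by rw [filter_sorted K items v, hBfilter v])

-- ===== VERDICT (by name: the statement is the Claim_ definition above) =====
theorem group_items_by_aisle_spec : Claim_equal_group_items_by_aisle := by
  intro items route_order _
  unfold Spec_group_items_by_aisle
  exact group_items_by_aisle_eq items route_order
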